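-- pv_equiv track=rewrite | github.com/Vaan5/piecewisecrf | piecewisecrf/datasets/helpers/pairwise_label_generator.py | get_number_of_all_neigbhours_above_below
-- ===== SOURCE A (Python) =====
-- def get_number_of_all_neigbhours_above_below(h, w, nsize_height, nsize_width):
--     '''
--
--     Returns total number of neighbours for the above/below neighbourhood
--
--     Returns
--     -------
--     ret_val: int
--         Total number of neighbours
--
--
--     '''
--     ret_val = 0
--     nsize_width_half = int(nsize_width / 2)
--     for i in range(int(h)):
--         for j in range(int(w)):
--             for n_i in range(i - nsize_height + 1, i):
--                 for n_j in range(j - nsize_width_half, j + nsize_width_half + 1):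
--                     if n_i < 0 or n_i >= h or n_j < 0 or n_j >= w or (n_i == i and n_j == j):
--                         continue
--                     ret_val += 1
--     return ret_val
-- ===== SOURCE B (Python) =====
-- def get_number_of_all_neigbhours_above_below(h, w, nsize_height, nsize_width):
--     # Separable closed-form count: the neighbourhood test factors into an
--     # independent row count and column count, so the quadruple loop becomes
--     # one pass over rows times one pass over columns.
--     if h <= 0 or w <= 0:
--         return 0
--     q = int(nsize_width / 2)
--     rows = sum(max(0, min(i, nsize_height - 1)) for i in range(int(h)))
--     cols = sum(max(0, min(j + q, w - 1) - max(0, j - q) + 1) for j in range(int(w)))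
--     return rows * cols
-- ===== Notes on version B (the rewrite author's own statement) =====
-- stated objective: faster
-- what changed: The quadruple nested loop over (i,j,n_i,n_j) is replaced by two independent one-dimensional sums (valid row-neighbour count per row, valid column-neighbour count per column) whose product is the total, since the validity test factorizes.
import Mathlib
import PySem

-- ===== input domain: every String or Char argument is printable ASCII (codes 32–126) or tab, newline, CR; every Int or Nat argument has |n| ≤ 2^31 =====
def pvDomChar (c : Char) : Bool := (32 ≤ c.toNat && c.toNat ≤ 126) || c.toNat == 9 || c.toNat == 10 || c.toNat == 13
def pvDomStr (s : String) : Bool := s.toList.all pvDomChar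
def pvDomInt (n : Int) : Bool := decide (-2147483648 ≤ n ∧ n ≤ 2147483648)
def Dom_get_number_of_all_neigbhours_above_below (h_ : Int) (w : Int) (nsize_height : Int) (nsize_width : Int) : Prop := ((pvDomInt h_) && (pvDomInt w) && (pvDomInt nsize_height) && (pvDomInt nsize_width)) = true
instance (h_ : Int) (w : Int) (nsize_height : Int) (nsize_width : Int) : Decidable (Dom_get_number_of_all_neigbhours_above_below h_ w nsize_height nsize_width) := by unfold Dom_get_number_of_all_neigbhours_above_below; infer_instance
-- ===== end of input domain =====

-- ===== PORT A =====
def get_number_of_all_neigbhours_above_below (h_ : Int) (w : Int) (nsize_height : Int) (nsize_width : Int) : Int :=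
  -- int(nsize_width / 2): float division then int() truncates toward zero; exact as
  -- truncated integer division for |nsize_width| <= 2^31 (well below 2^53).
  let nsize_width_half : Int := Int.tdiv nsize_width 2
  (PySem.List.pyRange 0 h_ 1).foldl (fun acc i =>
    (PySem.List.pyRange 0 w 1).foldl (fun acc j =>
      (PySem.List.pyRange (i - nsize_height + 1) i 1).foldl (fun acc n_i =>
        (PySem.List.pyRange (j - nsize_width_half) (j + nsize_width_half + 1) 1).foldl (fun acc n_j =>
          if n_i < 0 ∨ n_i ≥ h_ ∨ n_j < 0 ∨ n_j ≥ w ∨ (n_i = i ∧ n_j = j) then acc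
          else acc + 1) acc) acc) acc) 0

-- ===== PORT B =====
-- B: the validity test factorizes, so the total is (sum over rows of valid
-- above-row count) * (sum over columns of valid in-window column count).
def get_number_of_all_neigbhours_above_below_alt (h_ : Int) (w : Int) (nsize_height : Int) (nsize_width : Int) : Int :=
  if h_ ≤ 0 ∨ w ≤ 0 then 0 else
  let q : Int := Int.tdiv nsize_width 2
  let rows : Int := (PySem.List.pyRange 0 h_ 1).foldl
    (fun s i => s + max 0 (min i (nsize_height - 1))) 0
  let cols : Int := (PySem.List.pyRange 0 w 1).foldl
    (fun s j => s + max 0 (min (j + q) (w - 1) - max 0 (j - q) + 1)) 0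
  rows * cols

-- ===== PRECONDITION & SPEC =====
def Spec_get_number_of_all_neigbhours_above_below (h_ : Int) (w : Int) (nsize_height : Int) (nsize_width : Int) (out : Int) : Prop := out = get_number_of_all_neigbhours_above_below_alt h_ w nsize_height nsize_width
instance (h_ : Int) (w : Int) (nsize_height : Int) (nsize_width : Int) (out : Int) : Decidable (Spec_get_number_of_all_neigbhours_above_below h_ w nsize_height nsize_width out) := by unfold Spec_get_number_of_all_neigbhours_above_below; infer_instance

-- ===== CLAIM (what is proved, stated in full; the proofs are below) =====
def Claim_equal_get_number_of_all_neigbhours_above_below : Prop := ∀ (h_ : Int) (w : Int) (nsize_height : Int) (nsize_width : Int), Dom_get_number_of_all_neigbhours_above_below h_ w nsize_height nsize_width → Spec_get_number_of_all_neigbhours_above_below h_ w nsize_height nsize_width (get_number_of_all_neigbhours_above_below h_ w nsize_height nsize_width)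

-- ===== LEMMAS AND PROOFS =====
-- scratch lemmas
theorem pv_countP_interval (c d : Int) : ∀ (n : Nat) (a b : Int), (b - a).toNat = n →
    (((PySem.List.pyRange a b 1).countP (fun x => decide (c ≤ x ∧ x < d))) : Int)
      = max 0 (min b d - max a c) := by
  intro n
  induction n with
  | zero =>
    intro a b hn
    rw [PySem.List.pyRange_one_eq_nil (by omega)]
    simp only [List.countP_nil, Int.natCast_zero]
    omega
  | succ k ih =>
    intro a b hn
    rw [PySem.List.pyRange_one_cons (by omega), List.countP_cons]
    have h2 := ih (a + 1) b (by omega)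
    by_cases hc : c ≤ a ∧ a < d
    · simp only [hc, and_self, decide_true, if_pos]
      push_cast
      rw [h2]
      omega
    · have : (decide (c ≤ a ∧ a < d)) = false := by simpa using hc
      simp only [this]
      simp only [Bool.false_eq_true, if_false, Nat.add_zero]
      rw [h2]
      omega

theorem pv_sum_map_if (l : List Int) (c : Int) :
    (l.map (fun x => if 0 ≤ x then c else 0)).sum
      = ((l.countP (fun x => decide (0 ≤ x))) : Int) * c := by
  induction l with
  | nil => simp
  | cons x xs ih =>
    rw [List.map_cons, List.sum_cons, List.countP_cons, ih]
    by_cases hx : (0:Int) ≤ x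
    · simp [hx]; ring
    · simp [hx]


theorem pv_inner_nj (h_ w i j ni a b acc : Int) (hni : ni < i) (hih : i < h_) :
    (PySem.List.pyRange a b 1).foldl
      (fun acc n_j => if ni < 0 ∨ ni ≥ h_ ∨ n_j < 0 ∨ n_j ≥ w ∨ (ni = i ∧ n_j = j) then acc
        else acc + 1) acc
    = acc + (if 0 ≤ ni then max 0 (min b w - max a 0) else 0) := by
  by_cases hpos : 0 ≤ ni
  · rw [PySem.List.foldl_congr_mem' _ _
      (fun acc n_j => if 0 ≤ n_j ∧ n_j < w then acc + 1 else acc) _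
      (by
        intro x _ acc
        dsimp only
        by_cases hxw : 0 ≤ x ∧ x < w
        · rw [if_pos hxw, if_neg]
          rintro (hc | hc | hc | hc | ⟨rfl, rfl⟩) <;> omega
        · rw [if_neg hxw, if_pos (by omega)])]
    rw [PySem.List.foldl_ite_add_one]
    rw [pv_countP_interval 0 w (b - a).toNat a b rfl]
    rw [if_pos hpos]
  · rw [PySem.List.foldl_congr_mem' _ _ (fun acc _ => acc) _
      (by intro x _ acc; dsimp only; rw [if_pos (by left; omega)])]
    rw [PySem.List.foldl_ignore, if_neg hpos, add_zero]

theorem pv_inner_ni (h_ w nh q i j acc : Int) (hi0 : 0 ≤ i) (hih : i < h_) :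
    (PySem.List.pyRange (i - nh + 1) i 1).foldl (fun acc n_i =>
        (PySem.List.pyRange (j - q) (j + q + 1) 1).foldl (fun acc n_j =>
          if n_i < 0 ∨ n_i ≥ h_ ∨ n_j < 0 ∨ n_j ≥ w ∨ (n_i = i ∧ n_j = j) then acc
          else acc + 1) acc) acc
    = acc + max 0 (min i (nh - 1)) * max 0 (min (j + q) (w - 1) - max 0 (j - q) + 1) := by
  rw [PySem.List.foldl_congr_mem' _ _
      (fun acc n_i => acc + (if 0 ≤ n_i then max 0 (min (j + q + 1) w - max (j - q) 0) else 0)) _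
      (by
        intro x hx acc
        dsimp only
        have hxlt : x < i := ((PySem.List.mem_pyRange_one).1 hx).2
        exact pv_inner_nj h_ w i j x (j - q) (j + q + 1) acc hxlt hih)]
  rw [PySem.List.foldl_add, pv_sum_map_if]
  have hcnt : (((PySem.List.pyRange (i - nh + 1) i 1).countP (fun x => decide (0 ≤ x))) : Int)
      = max 0 (min i (nh - 1)) := by
    have hc : ∀ x ∈ PySem.List.pyRange (i - nh + 1) i 1,
        ((decide (0 ≤ x)) = true ↔ (decide (0 ≤ x ∧ x < i)) = true) := by
      intro x hx
      have hxlt : x < i := ((PySem.List.mem_pyRange_one).1 hx).2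
      by_cases h0 : 0 ≤ x <;> simp [h0, hxlt]
    rw [List.countP_congr hc, pv_countP_interval 0 i (i - (i - nh + 1)).toNat (i - nh + 1) i rfl]
    omega
  rw [hcnt]
  have heq : max 0 (min (j + q + 1) w - max (j - q) 0)
      = max 0 (min (j + q) (w - 1) - max 0 (j - q) + 1) := by omega
  rw [heq]

theorem pv_main (h_ w nh q : Int) :
    (PySem.List.pyRange 0 h_ 1).foldl (fun acc i =>
      (PySem.List.pyRange 0 w 1).foldl (fun acc j =>
        (PySem.List.pyRange (i - nh + 1) i 1).foldl (fun acc n_i =>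
          (PySem.List.pyRange (j - q) (j + q + 1) 1).foldl (fun acc n_j =>
            if n_i < 0 ∨ n_i ≥ h_ ∨ n_j < 0 ∨ n_j ≥ w ∨ (n_i = i ∧ n_j = j) then acc
            else acc + 1) acc) acc) acc) 0
    = ((PySem.List.pyRange 0 h_ 1).foldl (fun s i => s + max 0 (min i (nh - 1))) 0)
      * ((PySem.List.pyRange 0 w 1).foldl
          (fun s j => s + max 0 (min (j + q) (w - 1) - max 0 (j - q) + 1)) 0) := by
  rw [PySem.List.foldl_congr_mem' _ _
      (fun acc i => acc + max 0 (min i (nh - 1)) *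
        ((PySem.List.pyRange 0 w 1).map
          (fun j => max 0 (min (j + q) (w - 1) - max 0 (j - q) + 1))).sum) _
      (by
        intro i hi acc
        dsimp only
        obtain ⟨hi0, hih⟩ := (PySem.List.mem_pyRange_one).1 hi
        rw [PySem.List.foldl_congr_mem' _ _
            (fun acc j => acc + max 0 (min i (nh - 1)) *
              max 0 (min (j + q) (w - 1) - max 0 (j - q) + 1)) _
            (by intro j _ acc; dsimp only; exact pv_inner_ni h_ w nh q i j acc hi0 hih)]
        rw [PySem.List.foldl_add, List.sum_map_mul_left])]
  rw [PySem.List.foldl_add, List.sum_map_mul_right]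
  rw [PySem.List.foldl_add, PySem.List.foldl_add]
  ring

-- ===== VERDICT (by name: the statement is the Claim_ definition above) =====
theorem get_number_of_all_neigbhours_above_below_spec : Claim_equal_get_number_of_all_neigbhours_above_below := by
  intro h_ w nsize_height nsize_width _
  unfold Spec_get_number_of_all_neigbhours_above_below
  unfold get_number_of_all_neigbhours_above_below get_number_of_all_neigbhours_above_below_alt
  by_cases h0 : h_ ≤ 0 ∨ w ≤ 0
  · rw [if_pos h0]
    rcases h0 with h0 | h0
    · simp only [PySem.List.pyRange_one_eq_nil h0, List.foldl_nil]
    · simp only [PySem.List.pyRange_one_eq_nil h0, List.foldl_nil]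
      rw [PySem.List.foldl_ignore]
  · rw [if_neg h0]
    exact pv_main h_ w nsize_height (Int.tdiv nsize_width 2)
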